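-- pv_equiv track=rewrite | github.com/abdullahYAq/network-kpi-engine | src/validation/kpi_validations.py | validate_expression_syntax
-- ===== SOURCE A (Python) =====
-- def validate_expression_syntax(expression):
--     expression_tremed = expression.strip()
--     allowed_chars = set("ABCDEFGHIJKLMNOPQRSTUVWXYZabcdefghijklmnopqrstuvwxyz0123456789_+-'()")
--     if not set(expression_tremed).issubset(allowed_chars):
--         return False
--     # check for ++ -- ** -+ +- and other invalid combinations
--     invalid_combinations = ["++", "--", "**", "-+", "+-", "()", "(+", "(-", "+)", "-)"]
--     for combo in invalid_combinations:
--         if combo in expression_tremed: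
--             return False
--     return True
-- ===== SOURCE B (Python) =====
-- def validate_expression_syntax(expression):
--     s = expression.strip()
--     allowed = set("ABCDEFGHIJKLMNOPQRSTUVWXYZabcdefghijklmnopqrstuvwxyz0123456789_+-'()")
--     bad_pairs = {("+", "+"), ("-", "-"), ("-", "+"), ("+", "-"),
--                  ("(", ")"), ("(", "+"), ("(", "-"), ("+", ")"), ("-", ")")}
--     prev = None
--     for ch in s:
--         if ch not in allowed:
--             return False
--         if prev is not None and (prev, ch) in bad_pairs:
--             return False
--         prev = ch
--     return True
-- ===== Notes on version B (the rewrite author's own statement) =====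
-- stated objective: alternative
-- what changed: Replaced A's set-subset check followed by ten separate substring scans with a single pass over the stripped string that tracks the previous character and rejects on a disallowed character or a (prev, cur) pair in a precomputed set of invalid pairs (the unreachable '**' pair, whose '*' is not an allowed character anyway, is dropped).
import Mathlib
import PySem

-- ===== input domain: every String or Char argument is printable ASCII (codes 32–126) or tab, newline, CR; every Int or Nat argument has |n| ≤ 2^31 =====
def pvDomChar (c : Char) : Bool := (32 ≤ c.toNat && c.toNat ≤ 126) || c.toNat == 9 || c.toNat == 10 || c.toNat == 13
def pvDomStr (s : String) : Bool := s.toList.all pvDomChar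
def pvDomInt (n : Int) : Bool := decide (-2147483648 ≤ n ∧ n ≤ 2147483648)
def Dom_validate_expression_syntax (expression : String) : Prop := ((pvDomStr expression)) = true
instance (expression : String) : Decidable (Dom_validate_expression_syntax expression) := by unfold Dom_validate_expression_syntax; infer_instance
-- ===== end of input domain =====

-- B fuses A's subset check and ten substring scans into one pass maintaining the previous
-- character; same values everywhere (objective: alternative single-pass decomposition).

-- ===== PORT A =====
def pvAllowedChars : PySem.Set Char :=
  PySem.Set.ofList "ABCDEFGHIJKLMNOPQRSTUVWXYZabcdefghijklmnopqrstuvwxyz0123456789_+-'()".toList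

def pvCombos : List (List Char) :=
  [['+','+'],['-','-'],['*','*'],['-','+'],['+','-'],['(',')'],['(','+'],['(','-'],['+',')'],['-',')']]

def validate_expression_syntax (expression : String) : Bool :=
  let t := PySem.Chars.strip expression.toList
  if !(PySem.Set.issubset (PySem.Set.ofList t) pvAllowedChars) then false
  else if pvCombos.any (fun combo => PySem.Chars.isIn combo t) then false
  else true

-- ===== PORT B =====
def pvBadPairs : PySem.Set (Char × Char) :=
  PySem.Set.ofList [('+','+'),('-','-'),('-','+'),('+','-'),('(',')'),('(','+'),('(','-'),('+',')'),('-',')')]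

def pvScan : Option Char → List Char → Bool
  | _, [] => true
  | prev, c :: rest =>
    if !(PySem.Set.contains pvAllowedChars c) then false
    else if (match prev with
             | some p => PySem.Set.contains pvBadPairs (p, c)
             | none => false) then false
    else pvScan (some c) rest

def validate_expression_syntax_alt (expression : String) : Bool :=
  pvScan none (PySem.Chars.strip expression.toList)

-- ===== PRECONDITION & SPEC =====
def Spec_validate_expression_syntax (expression : String) (out : Bool) : Prop := out = validate_expression_syntax_alt expression
instance (expression : String) (out : Bool) : Decidable (Spec_validate_expression_syntax expression out) := by unfold Spec_validate_expression_syntax; infer_instance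

-- ===== CLAIM (what is proved, stated in full; the proofs are below) =====
def Claim_equal_validate_expression_syntax : Prop := ∀ (expression : String), Dom_validate_expression_syntax expression → Spec_validate_expression_syntax expression (validate_expression_syntax expression)

-- ===== LEMMAS AND PROOFS =====

-- pvScan with a previous character = "all chars allowed AND no adjacent pair (including prev::t) is bad"
theorem pvScan_some (t : List Char) : ∀ (p : Char),
    pvScan (some p) t =
      (t.all (fun c => PySem.Set.contains pvAllowedChars c) &&
        !(((p :: t).zip t).any (fun q => PySem.Set.contains pvBadPairs q))) := by
  induction t with
  | nil => intro p; simp [pvScan]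
  | cons c rest ih =>
    intro p
    simp only [pvScan, List.zip_cons_cons, List.any_cons, List.all_cons]
    rcases Bool.eq_false_or_eq_true (PySem.Set.contains pvAllowedChars c) with h1 | h1 <;>
      rcases Bool.eq_false_or_eq_true (PySem.Set.contains pvBadPairs (p, c)) with h2 | h2 <;>
      simp only [h1, h2] <;> simp [ih c]

theorem pvScan_none (t : List Char) :
    pvScan none t =
      (t.all (fun c => PySem.Set.contains pvAllowedChars c) &&
        !((t.zip t.tail).any (fun q => PySem.Set.contains pvBadPairs q))) := by
  cases t with
  | nil => simp [pvScan]
  | cons c rest =>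
    simp only [pvScan, pvScan_some, List.tail_cons, List.all_cons]
    rcases Bool.eq_false_or_eq_true (PySem.Set.contains pvAllowedChars c) with h1 | h1 <;>
      simp only [h1] <;> simp

-- a two-character substring occurs in t iff that pair of characters is adjacent in t
theorem infix_pair (a b : Char) (t : List Char) :
    [a, b] <:+: t ↔ (a, b) ∈ t.zip t.tail := by
  induction t with
  | nil => simp
  | cons c rest ih =>
    rw [List.infix_cons_iff, ih]
    cases rest with
    | nil =>
      simp only [List.tail_cons, List.zip_nil_right, List.not_mem_nil, iff_false]
      rintro (⟨r, hr⟩ | h)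
      · simp at hr
      · simp at h
    | cons d rest' =>
      simp only [List.tail_cons, List.zip_cons_cons, List.mem_cons]
      constructor
      · rintro (⟨r, hr⟩ | h)
        · simp only [List.cons_append, List.cons.injEq] at hr
          obtain ⟨rfl, rfl, -⟩ := hr
          exact Or.inl rfl
        · exact Or.inr h
      · rintro (h | h)
        · rw [Prod.mk.injEq] at h
          obtain ⟨rfl, rfl⟩ := h
          exact Or.inl ⟨rest', rfl⟩
        · exact Or.inr h

-- A's subset test is the per-character allowed test
theorem issubset_eq_all (t : List Char) :
    PySem.Set.issubset (PySem.Set.ofList t) pvAllowedChars =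
      t.all (fun c => PySem.Set.contains pvAllowedChars c) := by
  rw [Bool.eq_iff_iff, List.all_eq_true]
  constructor
  · intro h c hc
    exact (PySem.Set.contains_iff _ _).mpr
      ((PySem.Set.issubset_iff _ _).mp h c ((PySem.Set.mem_ofList _ _).mpr hc))
  · intro h
    refine (PySem.Set.issubset_iff _ _).mpr ?_
    intro x hx
    exact (PySem.Set.contains_iff _ _).mp (h x ((PySem.Set.mem_ofList _ _).mp hx))

-- '*' is not an allowed character
set_option maxRecDepth 4096 in
theorem star_not_allowed : PySem.Set.contains pvAllowedChars '*' = false := by decide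

-- given all characters allowed, A's ten substring scans = B's bad-adjacent-pair test
theorem combos_eq_pairs (t : List Char)
    (hall : t.all (fun c => PySem.Set.contains pvAllowedChars c) = true) :
    pvCombos.any (fun combo => PySem.Chars.isIn combo t) =
      (t.zip t.tail).any (fun q => PySem.Set.contains pvBadPairs q) := by
  have hstar : '*' ∉ t := by
    intro hmem
    have := (List.all_eq_true.mp hall) _ hmem
    rw [star_not_allowed] at this
    exact Bool.false_ne_true this
  rw [Bool.eq_iff_iff]
  constructor
  · intro h
    rcases List.any_eq_true.mp h with ⟨combo, hc, hin⟩
    have hinf := (PySem.Chars.isIn_iff_infix _ _).mp hin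
    apply List.any_eq_true.mpr
    fin_cases hc <;> rw [infix_pair] at hinf
    · exact ⟨_, hinf, by decide⟩
    · exact ⟨_, hinf, by decide⟩
    · exact absurd (List.of_mem_zip hinf).1 hstar
    · exact ⟨_, hinf, by decide⟩
    · exact ⟨_, hinf, by decide⟩
    · exact ⟨_, hinf, by decide⟩
    · exact ⟨_, hinf, by decide⟩
    · exact ⟨_, hinf, by decide⟩
    · exact ⟨_, hinf, by decide⟩
    · exact ⟨_, hinf, by decide⟩
  · intro h
    rcases List.any_eq_true.mp h with ⟨⟨x, y⟩, hq, hbad⟩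
    have hxy := (PySem.Set.contains_iff _ _).mp hbad
    rw [pvBadPairs, PySem.Set.mem_ofList] at hxy
    apply List.any_eq_true.mpr
    refine ⟨[x, y], ?_, (PySem.Chars.isIn_iff_infix _ _).mpr ((infix_pair x y t).mpr hq)⟩
    simp only [List.mem_cons, List.not_mem_nil, or_false, Prod.mk.injEq] at hxy
    rcases hxy with ⟨rfl,rfl⟩|⟨rfl,rfl⟩|⟨rfl,rfl⟩|⟨rfl,rfl⟩|⟨rfl,rfl⟩|⟨rfl,rfl⟩|⟨rfl,rfl⟩|⟨rfl,rfl⟩|⟨rfl,rfl⟩ <;> decide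

theorem ports_agree (s : String) :
    validate_expression_syntax s = validate_expression_syntax_alt s := by
  unfold validate_expression_syntax validate_expression_syntax_alt
  simp only []
  rw [pvScan_none, issubset_eq_all]
  by_cases hall : (PySem.Chars.strip s.toList).all
      (fun c => PySem.Set.contains pvAllowedChars c) = true
  · rw [combos_eq_pairs _ hall, hall]
    cases hp : ((PySem.Chars.strip s.toList).zip (PySem.Chars.strip s.toList).tail).any
        (fun q => PySem.Set.contains pvBadPairs q)
    · rfl
    · rfl
  · simp only [Bool.not_eq_true] at hall
    rw [hall]
    rfl

-- ===== VERDICT (by name: the statement is the Claim_ definition above) =====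
theorem validate_expression_syntax_spec : Claim_equal_validate_expression_syntax := by
  intro expression _
  unfold Spec_validate_expression_syntax
  exact ports_agree expression
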